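-- pv_equiv track=rewrite | github.com/Mat-Ku/ExerciseSegmentationRecognitionRepetitionCounting | utils/processing.py | segmenting
-- ===== SOURCE A (Python) =====
-- def segmenting(data, window_size):
--     """
--     Slices input data into segments of length of given window size.
--
--     Parameters:
--         data: Input data.
--         window_size: Number of instances per slice.
--
--     Returns:
--         List of segments of length of window size.
--     """
--     segments = []
--     for week in data:
--         week_segments = []
--         for window in range(0, len(week), window_size):
--             if window == 0:
--                 continue
--             else:
--                 if window + window_size > len(week):
--                     seg_1 = week[window - window_size:window]
--                     seg_2 = week[window:]
--                     week_segments.append(seg_1)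
--                     week_segments.append(seg_2)
--                 else:
--                     seg = week[window - window_size:window]
--                     week_segments.append(seg)
--         segments.append(week_segments)
--
--     return segments
-- ===== SOURCE B (Python) =====
-- def _week_segments(week, window_size):
--     # one pass of plain chunking, then a single trim decision
--     chunks = [week[i:i + window_size] for i in range(0, len(week), window_size)]
--     if len(chunks) <= 1:
--         return []
--     if len(week) % window_size == 0:
--         return chunks[:-1]
--     return chunks
--
--
-- def segmenting(data, window_size):
--     return [_week_segments(week, window_size) for week in data]
-- ===== Notes on version B (the rewrite author's own statement) =====
-- stated objective: simpler
-- what changed: B builds each week's plain chunk list in one comprehension and then applies a single trim decision (empty when at most one chunk, drop the last chunk when the length divides evenly), instead of A's per-window branching that reconstructs the previous chunk from index arithmetic inside the loop.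
-- outside the precondition, e.g. on segmenting([[1, 2, 3]], 0): A raises ValueError, B raises ValueError; on segmenting([], 0): A returns [], B returns []
import Mathlib
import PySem

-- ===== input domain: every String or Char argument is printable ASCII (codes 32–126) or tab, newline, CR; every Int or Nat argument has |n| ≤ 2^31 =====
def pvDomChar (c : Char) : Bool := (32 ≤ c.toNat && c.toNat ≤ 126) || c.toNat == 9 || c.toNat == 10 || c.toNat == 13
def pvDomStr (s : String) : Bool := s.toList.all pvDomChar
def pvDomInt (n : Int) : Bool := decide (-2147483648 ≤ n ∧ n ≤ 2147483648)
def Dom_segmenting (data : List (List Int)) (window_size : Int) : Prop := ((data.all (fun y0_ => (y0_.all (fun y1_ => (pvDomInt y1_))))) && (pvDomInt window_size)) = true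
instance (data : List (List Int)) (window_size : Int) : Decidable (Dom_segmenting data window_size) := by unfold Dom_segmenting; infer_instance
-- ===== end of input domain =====

-- B builds each week's plain chunk list in one pass and then applies a single trim
-- decision, instead of A's per-window branching reconstructing the previous chunk (objective: simpler).


-- ===== PORT A =====
-- inner loop of A: for window in range(0, len(week), window_size): …
def segWeekA (week : List Int) (ws : Int) : List (List Int) :=
  (PySem.List.pyRange 0 (week.length : Int) ws).foldl
    (fun acc w =>
      if w = 0 then acc
      else if w + ws > (week.length : Int) then
        (acc ++ [PySem.List.slice week (some (w - ws)) (some w)])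
          ++ [PySem.List.slice week (some w) none]
      else
        acc ++ [PySem.List.slice week (some (w - ws)) (some w)]) []

def segmenting (data : List (List Int)) (window_size : Int) : List (List (List Int)) :=
  data.foldl (fun segs week => segs ++ [segWeekA week window_size]) []

-- ===== PORT B =====
-- B's helper: chunk once with a comprehension, then one trim decision
def segWeekB (week : List Int) (ws : Int) : List (List Int) :=
  let chunks :=
    (PySem.List.pyRange 0 (week.length : Int) ws).map
      (fun i => PySem.List.slice week (some i) (some (i + ws)))
  if chunks.length ≤ 1 then []
  else if PySem.Int.mod (week.length : Int) ws = 0 then chunks.dropLast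
  else chunks

def segmenting_alt (data : List (List Int)) (window_size : Int) : List (List (List Int)) :=
  data.map (fun week => segWeekB week window_size)

-- ===== PRECONDITION & SPEC =====
-- Pre_ excludes window_size = 0: both Pythons raise ValueError in range() for every nonempty data
-- (for data = [] the loop never runs and both return []).
def Pre_segmenting (data : List (List Int)) (window_size : Int) : Prop := window_size ≠ 0
instance (data : List (List Int)) (window_size : Int) : Decidable (Pre_segmenting data window_size) := by unfold Pre_segmenting; infer_instance

def pvWitness_segmenting : List (List Int) × Int := ([[1, 2, 3], [4, 5, 6, 7]], 2)

def Spec_segmenting (data : List (List Int)) (window_size : Int) (out : List (List (List Int))) : Prop := out = segmenting_alt data window_size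
instance (data : List (List Int)) (window_size : Int) (out : List (List (List Int))) : Decidable (Spec_segmenting data window_size out) := by unfold Spec_segmenting; infer_instance

-- ===== CLAIM (what is proved, stated in full; the proofs are below) =====
def Claim_equal_segmenting : Prop := ∀ (data : List (List Int)) (window_size : Int), Dom_segmenting data window_size → Pre_segmenting data window_size → Spec_segmenting data window_size (segmenting data window_size)

-- ===== LEMMAS AND PROOFS =====

-- per-index contribution of A's loop body (proof-only helper)
def segContrib (week : List Int) (ws : Int) (k : ℕ) : List (List Int) :=
  if ws * (k : Int) = 0 then []
  else if ws * (k : Int) + ws > (week.length : Int) then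
    [PySem.List.slice week (some (ws * (k : Int) - ws)) (some (ws * (k : Int))),
     PySem.List.slice week (some (ws * (k : Int))) none]
  else [PySem.List.slice week (some (ws * (k : Int) - ws)) (some (ws * (k : Int)))]

-- B's j-th chunk (proof-only helper)
def segChunk (week : List Int) (ws : Int) (j : ℕ) : List Int :=
  PySem.List.slice week (some (ws * (j : Int))) (some (ws * (j : Int) + ws))

theorem prefix_eq (week : List Int) (ws : Int) (hws : 0 < ws) (M : ℕ)
    (h : ws * (M : Int) + ws ≤ (week.length : Int)) :
    (List.range (M + 1)).flatMap (segContrib week ws)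
      = (List.range M).map (segChunk week ws) := by
  induction M with
  | zero => simp [segContrib]
  | succ m ih =>
    rw [List.range_succ (n := m + 1), List.flatMap_append, ih (by push_cast at h ⊢; linarith)]
    rw [List.range_succ (n := m), List.map_append]
    simp only [List.flatMap_cons, List.flatMap_nil, List.map_cons, List.map_nil, List.append_nil,
      segContrib, segChunk]
    rw [if_neg (by push_cast; positivity), if_neg (by push_cast at h ⊢; omega)]
    have e1 : ws * ((m + 1 : ℕ) : Int) - ws = ws * ((m : ℕ) : Int) := by push_cast; ring
    have e2 : ws * ((m + 1 : ℕ) : Int) = ws * ((m : ℕ) : Int) + ws := by push_cast; ring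
    rw [e1, e2]

theorem tail_chunk (week : List Int) (a b : Int) (ha : 0 ≤ a)
    (hb : (week.length : Int) ≤ b) :
    PySem.List.slice week (some a) none = PySem.List.slice week (some a) (some b) := by
  have hb0 : 0 ≤ b := le_trans (by exact_mod_cast Nat.cast_nonneg week.length) hb
  rw [PySem.List.slice_from week ha, PySem.List.slice_toNat week ha hb0]
  rw [List.take_of_length_le]
  simp only [List.length_drop]
  omega

theorem week_eq (week : List Int) (ws : Int) (hws : ws ≠ 0) :
    segWeekA week ws = segWeekB week ws := by
  rcases lt_or_gt_of_ne hws with hneg | hpos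
  · -- negative step: empty range on both sides
    have hr : PySem.List.pyRange 0 (week.length : Int) ws = [] := by
      unfold PySem.List.pyRange
      rw [if_neg (by omega), if_neg (by omega)]
      simp
    simp [segWeekA, segWeekB, hr]
  · -- positive step
    rw [segWeekA, segWeekB, PySem.List.pyRange_of_pos _ _ hpos]
    simp only [List.foldl_map, List.map_map, zero_add, sub_zero]
    set n : Int := (week.length : Int) with hn
    have hn0 : 0 ≤ n := by exact_mod_cast Nat.cast_nonneg week.length
    have hfn : (fun (acc : List (List Int)) (k : ℕ) =>
        if ws * (k : Int) = 0 then acc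
        else if ws * (k : Int) + ws > n then
          (acc ++ [PySem.List.slice week (some (ws * (k : Int) - ws)) (some (ws * (k : Int)))])
            ++ [PySem.List.slice week (some (ws * (k : Int))) none]
        else acc ++ [PySem.List.slice week (some (ws * (k : Int) - ws)) (some (ws * (k : Int)))])
        = fun acc k => acc ++ segContrib week ws k := by
      funext acc k
      simp only [segContrib, hn]
      split_ifs <;> simp
    have hch : ((fun i => PySem.List.slice week (some i) (some (i + ws))) ∘ fun (k : ℕ) => ws * (k : Int))
        = segChunk week ws := by
      funext k
      simp [segChunk]
    rw [hfn, PySem.List.foldl_append_eq_flatMap, hch]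
    simp only [List.nil_append]
    by_cases hz : n < (1 : Int)
    · rw [if_neg (by omega)]
      simp
    · have hpos_n : (0 : Int) < n := by omega
      rw [if_pos hpos_n]
      set q : Int := (n + ws - 1) / ws with hq
      have hdm : ws * q + (n + ws - 1) % ws = n + ws - 1 := by
        rw [hq]; exact Int.ediv_add_emod _ _
      have hr0 : 0 ≤ (n + ws - 1) % ws := Int.emod_nonneg _ (by omega)
      have hr1 : (n + ws - 1) % ws < ws := Int.emod_lt_of_pos _ hpos
      have hq1 : ws * q ≤ n + ws - 1 := by omega
      have hq2 : n ≤ ws * q := by omega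
      have hqge1 : 1 ≤ q := by
        by_contra hc
        push_neg at hc
        have hle : ws * q ≤ 0 := mul_nonpos_of_nonneg_of_nonpos (le_of_lt hpos) (by omega)
        linarith
      obtain ⟨M, hM⟩ : ∃ M : ℕ, q.toNat = M + 1 := ⟨q.toNat - 1, by omega⟩
      rw [hM]
      rcases Nat.eq_zero_or_pos M with hM0 | hM1
      · subst hM0
        rw [if_pos (by simp)]
        simp [segContrib]
      · obtain ⟨m, hm⟩ : ∃ m : ℕ, M = m + 1 := ⟨M - 1, by omega⟩
        subst hm
        have hcast : ((m + 1 + 1 : ℕ) : Int) = q := by omega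
        rw [← hcast] at hq1 hq2
        push_cast at hq1 hq2
        rw [if_neg (by simp)]
        rw [show m + 1 + 1 = (m + 1) + 1 from rfl, List.range_succ (n := m + 1),
          List.flatMap_append, prefix_eq week ws hpos m (by push_cast; linarith)]
        simp only [List.flatMap_cons, List.flatMap_nil, List.append_nil, segContrib]
        rw [if_neg (by push_cast; positivity)]
        have e1 : ws * ((m + 1 : ℕ) : Int) - ws = ws * ((m : ℕ) : Int) := by push_cast; ring
        have e2 : ws * ((m + 1 : ℕ) : Int) = ws * ((m : ℕ) : Int) + ws := by push_cast; ring
        by_cases hdvd : PySem.Int.mod n ws = 0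
        · rw [if_pos hdvd]
          obtain ⟨t, ht⟩ := (PySem.Int.mod_eq_zero_iff_dvd n ws).mp hdvd
          have hmul : ws * ((m : Int) + 1) < ws * t := by linarith
          have h1 : (m : Int) + 1 < t := lt_of_mul_lt_mul_left hmul (le_of_lt hpos)
          have h2 : ws * ((m : Int) + 1 + 1) ≤ ws * t :=
            mul_le_mul_of_nonneg_left (by omega) (le_of_lt hpos)
          have hqt : n = ws * ((m : Int) + 1 + 1) := by linarith
          rw [if_neg (by push_cast; simp only [gt_iff_lt, not_lt]; linarith)]
          rw [e1, e2]
          rw [List.map_append, List.map_singleton, List.dropLast_concat,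
            List.range_succ (n := m), List.map_append]
          simp [segChunk]
        · rw [if_neg hdvd]
          have hnd : ¬ ws ∣ n := fun h => hdvd ((PySem.Int.mod_eq_zero_iff_dvd n ws).mpr h)
          have hlt : n < ws * ((m : Int) + 1 + 1) := by
            rcases lt_or_eq_of_le hq2 with h | h
            · linarith
            · exact absurd ⟨(m : Int) + 1 + 1, h⟩ hnd
          rw [if_pos (by push_cast; linarith)]
          rw [e1, e2]
          rw [tail_chunk week (ws * (m : Int) + ws) (ws * (m : Int) + ws + ws)
                (by positivity) (by linarith)]
          rw [List.map_append, List.map_singleton, List.range_succ (n := m), List.map_append]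
          simp [segChunk, show ws * ((m : Int) + 1) = ws * (m : Int) + ws from by ring]

-- ===== VERDICT (by name: the statement is the Claim_ definition above) =====
theorem segmenting_spec : Claim_equal_segmenting := by
  intro data ws _ hpre
  unfold Spec_segmenting segmenting segmenting_alt
  rw [PySem.List.foldl_append_singleton_eq_map]
  exact List.map_congr_left (fun week _ => week_eq week ws hpre)
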